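-- pv_equiv track=rewrite | github.com/xiaobingling93-pixel/Ascend-msit | msmodelslim/msmodelslim/pytorch/sparse/width_scale_network.py | _is_all_node_not_in_graph
-- ===== SOURCE A (Python) =====
-- def _is_all_node_not_in_graph(node_name, in_output_nodes, all_nodes_set):
--     in_graph_count = 0
--     all_count = 0
--     for in_out_node in in_output_nodes:
--         all_count += 1
--         if in_out_node in all_nodes_set:
--             in_graph_count += 1
--     if in_graph_count == 0:
--         return True
--     elif all_count != in_graph_count:
--         raise ValueError(f"Some node {node_name} upper or lower nodes are in the"
--                          f" graph to be prune, and some are not.")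
--     else:
--         return False
-- ===== SOURCE B (Python) =====
-- def _is_all_node_not_in_graph(node_name, in_output_nodes, all_nodes_set):
--     for first in in_output_nodes:
--         expected = first in all_nodes_set
--         if any((node in all_nodes_set) != expected for node in in_output_nodes[1:]):
--             raise ValueError(f"Some node {node_name} upper or lower nodes are in the"
--                              f" graph to be prune, and some are not.")
--         return not expected
--     return True
-- ===== Notes on version B (the rewrite author's own statement) =====
-- stated objective: alternative
-- what changed: Instead of A's full pass with two integer counters, B classifies the whole list by its FIRST element's membership and only verifies homogeneity of the rest with an early-exiting any(); the answer is read off the first element, not off counts.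
import Mathlib
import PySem

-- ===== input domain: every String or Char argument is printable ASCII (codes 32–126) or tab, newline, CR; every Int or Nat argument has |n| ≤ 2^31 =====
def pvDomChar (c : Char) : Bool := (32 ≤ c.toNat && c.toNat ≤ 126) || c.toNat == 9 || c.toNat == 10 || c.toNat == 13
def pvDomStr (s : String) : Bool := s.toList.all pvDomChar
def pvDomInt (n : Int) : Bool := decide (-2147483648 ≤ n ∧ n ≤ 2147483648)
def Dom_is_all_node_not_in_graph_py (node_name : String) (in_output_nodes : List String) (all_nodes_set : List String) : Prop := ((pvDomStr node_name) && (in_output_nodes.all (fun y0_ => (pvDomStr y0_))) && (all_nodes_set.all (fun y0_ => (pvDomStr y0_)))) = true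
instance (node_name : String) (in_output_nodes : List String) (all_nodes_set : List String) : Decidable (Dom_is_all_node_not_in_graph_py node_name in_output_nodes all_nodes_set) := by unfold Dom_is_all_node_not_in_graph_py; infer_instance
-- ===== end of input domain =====

-- B reads the answer off the FIRST element's membership and only verifies homogeneity of the
-- rest with an early-exiting any(), instead of A's two-counter full pass (alternative; not faster).

-- ===== PORT A =====
-- counting loop: state (in_graph_count, all_count); the ValueError branch is outside Pre_ (port returns false there)
def is_all_node_not_in_graph_py (node_name : String) (in_output_nodes : List String) (all_nodes_set : List String) : Bool :=
  let st := in_output_nodes.foldl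
    (fun (p : Int × Int) in_out_node =>
      ((if all_nodes_set.contains in_out_node then p.1 + 1 else p.1), p.2 + 1)) (0, 0)
  if st.1 = 0 then true
  else if st.2 ≠ st.1 then false  -- raise ValueError (excluded by Pre_)
  else false

-- ===== PORT B =====
-- first-element classification; 'in_output_nodes[1:]' is List.drop 1; the ValueError branch
-- is outside Pre_ (port returns false there)
def is_all_node_not_in_graph_py_alt (node_name : String) (in_output_nodes : List String) (all_nodes_set : List String) : Bool :=
  match in_output_nodes with
  | [] => true
  | first :: _ =>
    let expected := all_nodes_set.contains first
    if (in_output_nodes.drop 1).any (fun node => all_nodes_set.contains node != expected)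
    then false  -- raise ValueError (excluded by Pre_)
    else !expected

-- ===== PRECONDITION & SPEC =====
-- Pre_ excludes exactly the mixed inputs (some in_output_nodes in the graph set, some not),
-- on which both A and B raise ValueError.
def Pre_is_all_node_not_in_graph_py (node_name : String) (in_output_nodes : List String) (all_nodes_set : List String) : Prop :=
  (∀ x ∈ in_output_nodes, x ∈ all_nodes_set) ∨ (∀ x ∈ in_output_nodes, x ∉ all_nodes_set)
instance (node_name : String) (in_output_nodes : List String) (all_nodes_set : List String) : Decidable (Pre_is_all_node_not_in_graph_py node_name in_output_nodes all_nodes_set) := by unfold Pre_is_all_node_not_in_graph_py; infer_instance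
def pvWitness_is_all_node_not_in_graph_py : String × List String × List String := ("n", ["a", "b"], ["a", "b", "c"])
def Spec_is_all_node_not_in_graph_py (node_name : String) (in_output_nodes : List String) (all_nodes_set : List String) (out : Bool) : Prop := out = is_all_node_not_in_graph_py_alt node_name in_output_nodes all_nodes_set
instance (node_name : String) (in_output_nodes : List String) (all_nodes_set : List String) (out : Bool) : Decidable (Spec_is_all_node_not_in_graph_py node_name in_output_nodes all_nodes_set out) := by unfold Spec_is_all_node_not_in_graph_py; infer_instance

-- ===== CLAIM (what is proved, stated in full; the proofs are below) =====
def Claim_equal_is_all_node_not_in_graph_py : Prop := ∀ (node_name : String) (in_output_nodes : List String) (all_nodes_set : List String), Dom_is_all_node_not_in_graph_py node_name in_output_nodes all_nodes_set → Pre_is_all_node_not_in_graph_py node_name in_output_nodes all_nodes_set → Spec_is_all_node_not_in_graph_py node_name in_output_nodes all_nodes_set (is_all_node_not_in_graph_py node_name in_output_nodes all_nodes_set)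

-- ===== LEMMAS AND PROOFS =====

-- A's loop when no element is in the graph set
theorem pv_foldl_none (alls : List String) (xs : List String)
    (h : ∀ x ∈ xs, x ∉ alls) (a b : Int) :
    xs.foldl (fun (p : Int × Int) n =>
      ((if alls.contains n then p.1 + 1 else p.1), p.2 + 1)) (a, b)
      = (a, b + xs.length) := by
  induction xs generalizing a b with
  | nil => simp
  | cons y ys ih =>
    have hy : alls.contains y = false := by
      simp only [List.contains_eq_mem, decide_eq_false_iff_not]
      exact h y (by simp)
    simp only [List.foldl_cons, hy, Bool.false_eq_true, if_false]
    rw [ih (fun x hx => h x (by simp [hx]))]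
    simp only [List.length_cons]
    congr 1; push_cast; ring

-- A's loop when every element is in the graph set
theorem pv_foldl_all (alls : List String) (xs : List String)
    (h : ∀ x ∈ xs, x ∈ alls) (a b : Int) :
    xs.foldl (fun (p : Int × Int) n =>
      ((if alls.contains n then p.1 + 1 else p.1), p.2 + 1)) (a, b)
      = (a + xs.length, b + xs.length) := by
  induction xs generalizing a b with
  | nil => simp
  | cons y ys ih =>
    have hy : alls.contains y = true := by
      simp only [List.contains_eq_mem, decide_eq_true_eq]
      exact h y (by simp)
    simp only [List.foldl_cons, hy, if_true]
    rw [ih (fun x hx => h x (by simp [hx]))]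
    simp only [List.length_cons]
    congr 1 <;> (push_cast; ring)

-- ===== VERDICT (by name: the statement is the Claim_ definition above) =====
theorem is_all_node_not_in_graph_py_spec : Claim_equal_is_all_node_not_in_graph_py := by
  intro node_name ins alls _ hpre
  unfold Spec_is_all_node_not_in_graph_py is_all_node_not_in_graph_py is_all_node_not_in_graph_py_alt
  rcases hpre with hall | hnone
  · -- every element of ins is in alls
    rw [pv_foldl_all alls ins hall 0 0]
    cases ins with
    | nil => simp
    | cons y ys =>
      have hy : alls.contains y = true := by
        simp only [List.contains_eq_mem, decide_eq_true_eq]; exact hall y (by simp)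
      have hany : ((y :: ys).drop 1).any (fun node => alls.contains node != alls.contains y) = false := by
        simp only [List.drop_succ_cons, List.drop_zero, List.any_eq_false]
        intro x hx
        have hx' : alls.contains x = true := by
          simp only [List.contains_eq_mem, decide_eq_true_eq]; exact hall x (by simp [hx])
        rw [hx', hy]; decide
      simp only [hany, Bool.false_eq_true, if_false, hy]
      have hlen : (0 : Int) + ((y :: ys).length : Int) ≠ 0 := by
        simp only [List.length_cons]; push_cast; omega
      rw [if_neg hlen]
      simp
  · -- no element of ins is in alls
    rw [pv_foldl_none alls ins hnone 0 0]
    cases ins with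
    | nil => simp
    | cons y ys =>
      have hy : alls.contains y = false := by
        simp only [List.contains_eq_mem, decide_eq_false_iff_not]; exact hnone y (by simp)
      simp only [pv_foldl_none]
      simp
      exact ⟨fun x hx => iff_of_false (hnone x (by simp [hx])) (hnone y (by simp)),
             hnone y (by simp)⟩
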